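-- pv_equiv track=rewrite | github.com/ZeroLoss-Lab/HACHIMI | analyse_by_chunk.py | _count_syllables_concat
-- ===== SOURCE A (Python) =====
-- def _count_syllables_concat(token: str) -> int:
--     """
--     统计 token 内按“音节+声调”连写的音节数（每个音节形如 [a-z]+[1-5]）。
--     例如：'huan4ying1' -> 2；'li3' -> 1；不合法返回 0。
--     """
--     if not isinstance(token, str) or not token:
--         return 0
--     i, n, cnt = 0, len(token), 0
--     while i < n:
--         # 连续字母段
--         j = i
--         while j < n and 'a' <= token[j] <= 'z':
--             j += 1
--         # 必须跟一个 1-5 的声调数字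
--         if j == i or j >= n or token[j] not in "12345":
--             return 0
--         cnt += 1
--         i = j + 1
--     return cnt
-- ===== SOURCE B (Python) =====
-- def _count_syllables_concat(token: str) -> int:
--     """Single-pass DFA: track whether we are inside a syllable's letter run;
--     a tone digit closes a syllable and bumps the count; anything else is invalid."""
--     if not isinstance(token, str) or not token:
--         return 0
--     cnt = 0
--     in_syllable = False
--     for ch in token:
--         if 'a' <= ch <= 'z':
--             in_syllable = True
--         elif ch in "12345" and in_syllable:
--             cnt += 1
--             in_syllable = False
--         else:
--             return 0
--     return 0 if in_syllable else cnt
-- ===== Notes on version B (the rewrite author's own statement) =====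
-- stated objective: simpler
-- what changed: Replaced A's nested index-jumping while loops (inner letter-run scan plus outer unit loop) by a single for-loop two-state automaton that tracks whether the scan is inside a letter run and counts the tone digits that close a run.
import Mathlib
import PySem

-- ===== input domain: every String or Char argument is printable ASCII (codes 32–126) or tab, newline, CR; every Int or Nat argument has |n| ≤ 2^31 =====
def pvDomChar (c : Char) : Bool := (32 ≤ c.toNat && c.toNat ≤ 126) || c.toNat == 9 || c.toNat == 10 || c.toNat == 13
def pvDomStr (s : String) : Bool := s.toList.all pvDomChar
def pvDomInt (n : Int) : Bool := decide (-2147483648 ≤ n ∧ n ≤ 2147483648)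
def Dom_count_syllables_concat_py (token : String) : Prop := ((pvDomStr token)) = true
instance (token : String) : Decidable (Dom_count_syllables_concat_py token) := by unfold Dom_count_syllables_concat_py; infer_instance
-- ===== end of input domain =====

-- B replaces A's nested index-jumping scans by a single-pass two-state automaton (alternative decomposition, same O(n) cost).

-- ===== PORT A =====
-- 'a' <= token[j] <= 'z'
def pvIsLet (c : Char) : Bool := decide ('a' ≤ c ∧ c ≤ 'z')
-- token[j] in "12345"
def pvIsTone (c : Char) : Bool := decide (c ∈ ("12345".toList))

-- inner while: 'while j < n and letter(token[j]): j += 1' (returns final j)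
def pvAJ (cs : List Char) (j : Nat) : Nat :=
  if h : j < cs.length ∧ pvIsLet cs[j]! then pvAJ cs (j + 1) else j
termination_by cs.length - j
decreasing_by omega

-- the inner loop only moves j forward (needed for the outer loop's termination)
theorem pvAJ_ge (cs : List Char) (j : Nat) : j ≤ pvAJ cs j := by
  unfold pvAJ
  split
  · exact le_trans (Nat.le_succ j) (pvAJ_ge cs (j + 1))
  · exact le_refl j
termination_by cs.length - j
decreasing_by rename_i h; omega

-- outer while loop of A
def pvALoop (cs : List Char) (i : Nat) (cnt : Int) : Int :=
  if hi : i < cs.length then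
    let j := pvAJ cs i
    if j = i ∨ cs.length ≤ j ∨ ¬ pvIsTone cs[j]! then 0
    else pvALoop cs (j + 1) (cnt + 1)
  else cnt
termination_by cs.length - i
decreasing_by have := pvAJ_ge cs i; omega

def count_syllables_concat_py (token : String) : Int :=
  if token.toList = [] then 0 else pvALoop token.toList 0 0

-- ===== PORT B =====
-- single pass over the characters with state (cnt, in_syllable); 0 on any invalid char
def pvBLoop : List Char → Int → Bool → Int
  | [], cnt, inS => if inS then 0 else cnt
  | ch :: rest, cnt, inS =>
    if pvIsLet ch then pvBLoop rest cnt true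
    else if pvIsTone ch ∧ inS then pvBLoop rest (cnt + 1) false
    else 0

def count_syllables_concat_py_alt (token : String) : Int :=
  if token.toList = [] then 0 else pvBLoop token.toList 0 false

-- ===== PRECONDITION & SPEC =====
def Spec_count_syllables_concat_py (token : String) (out : Int) : Prop := out = count_syllables_concat_py_alt token
instance (token : String) (out : Int) : Decidable (Spec_count_syllables_concat_py token out) := by unfold Spec_count_syllables_concat_py; infer_instance

-- ===== CLAIM (what is proved, stated in full; the proofs are below) =====
def Claim_equal_count_syllables_concat_py : Prop := ∀ (token : String), Dom_count_syllables_concat_py token → Spec_count_syllables_concat_py token (count_syllables_concat_py token)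

-- ===== LEMMAS AND PROOFS =====

-- reference parser, two states: pvP0 = expecting the start of a syllable, pvP1 = inside a letter run
mutual
def pvP0 : List Char → Option Nat
  | [] => some 0
  | c :: r => if pvIsLet c then pvP1 r else none
def pvP1 : List Char → Option Nat
  | [] => none
  | c :: r => if pvIsLet c then pvP1 r else if pvIsTone c then (pvP0 r).map (· + 1) else none
end

-- a run of letters is absorbed by state pvP1
theorem pvP1_letters (ls d : List Char) (h : ∀ c ∈ ls, pvIsLet c) :
    pvP1 (ls ++ d) = pvP1 d := by
  induction ls with
  | nil => rfl
  | cons c rest ih =>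
    have hc : pvIsLet c := h c (by simp)
    simp [pvP1, hc, ih fun x hx => h x (by simp [hx])]

-- the head of dropWhile fails the predicate
theorem dropWhile_head_false (p : Char → Bool) (d : List Char) (t : Char) (rest : List Char)
    (h : d.dropWhile p = t :: rest) : p t = false := by
  induction d with
  | nil => simp at h
  | cons c r ih =>
    by_cases hc : p c
    · exact ih (by simpa [List.dropWhile, hc] using h)
    · rw [List.dropWhile_cons_of_neg hc] at h
      cases h; simpa using hc

-- the inner while loop computes i + length of the letter prefix of (drop i)
theorem pvAJ_spec (cs : List Char) (i : Nat) :
    pvAJ cs i = i + ((cs.drop i).takeWhile pvIsLet).length := by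
  unfold pvAJ
  by_cases hi : i < cs.length
  · have hdrop : cs.drop i = cs[i] :: cs.drop (i + 1) := List.drop_eq_getElem_cons hi
    by_cases hl : pvIsLet cs[i]!
    · rw [dif_pos ⟨hi, hl⟩, pvAJ_spec cs (i + 1), hdrop]
      have : cs[i]! = cs[i] := getElem!_pos cs i hi
      rw [this] at hl
      simp [List.takeWhile, hl]
      omega
    · rw [dif_neg (by tauto), hdrop]
      have : cs[i]! = cs[i] := getElem!_pos cs i hi
      rw [this] at hl
      simp [List.takeWhile, hl]
  · rw [dif_neg (by tauto)]
    rw [List.drop_eq_nil_of_le (by omega)]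
    simp
termination_by cs.length - i
decreasing_by omega

-- A's outer loop agrees with the reference parser on the remaining suffix
theorem pvALoop_spec (cs : List Char) (i : Nat) (cnt : Int) :
    pvALoop cs i cnt =
      match pvP0 (cs.drop i) with
      | some k => cnt + (k : Int)
      | none => 0 := by
  unfold pvALoop
  by_cases hi : i < cs.length
  · rw [dif_pos hi]
    have hdrop : cs.drop i = cs[i] :: cs.drop (i + 1) := List.drop_eq_getElem_cons hi
    have hj := pvAJ_spec cs i
    set d := cs.drop i with hd
    set tw := d.takeWhile pvIsLet with htw
    set dw := d.dropWhile pvIsLet with hdw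
    have hsplit : tw ++ dw = d := List.takeWhile_append_dropWhile
    have hdwdrop : dw = cs.drop (pvAJ cs i) := by
      have h1 : d.drop tw.length = dw := by
        conv_lhs => rw [← hsplit]
        exact List.drop_left
      rw [← h1, hd, List.drop_drop, hj]
    by_cases h0 : tw.length = 0
    · have hjat : pvAJ cs i = i := by omega
      rw [if_pos (by left; exact hjat)]
      have htwnil : tw = [] := List.length_eq_zero_iff.mp h0
      have hnl : ¬ pvIsLet cs[i] := by
        intro hl
        have : d.takeWhile pvIsLet = cs[i] :: (cs.drop (i+1)).takeWhile pvIsLet := by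
          rw [hdrop]; simp [List.takeWhile, hl]
        rw [← htw, htwnil] at this; simp at this
      rw [hdrop, pvP0]
      simp [hnl]
    · have hji : pvAJ cs i ≠ i := by omega
      have hlets : ∀ c ∈ tw, pvIsLet c := fun c hc => List.mem_takeWhile_imp (htw ▸ hc)
      have hp0 : pvP0 d = pvP1 dw := by
        conv_lhs => rw [← hsplit]
        cases htww : tw with
        | nil => simp [htww] at h0
        | cons c twr =>
          have hc : pvIsLet c := hlets c (by simp [htww])
          rw [List.cons_append, pvP0, if_pos hc]
          exact pvP1_letters twr dw fun x hx => hlets x (by simp [htww, hx])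
      rw [hp0]
      by_cases hjn : cs.length ≤ pvAJ cs i
      · rw [if_pos (by right; left; exact hjn)]
        rw [hdwdrop, List.drop_eq_nil_of_le hjn, pvP1]
      · push Not at hjn
        have hdrop2 : cs.drop (pvAJ cs i) = cs[pvAJ cs i] :: cs.drop (pvAJ cs i + 1) :=
          List.drop_eq_getElem_cons hjn
        have hbang : cs[pvAJ cs i]! = cs[pvAJ cs i] := getElem!_pos cs _ hjn
        have hnl : pvIsLet cs[pvAJ cs i] = false :=
          dropWhile_head_false pvIsLet d _ _ (by rw [← hdw, hdwdrop, hdrop2])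
        rw [hdwdrop, hdrop2, pvP1, hnl]
        by_cases ht : pvIsTone cs[pvAJ cs i]
        · rw [if_neg (by rw [hbang]; push Not; exact ⟨hji, by omega, by simpa using ht⟩)]
          simp only [if_pos ht, Bool.false_eq_true, if_false]
          rw [pvALoop_spec cs (pvAJ cs i + 1) (cnt + 1)]
          cases hp : pvP0 (cs.drop (pvAJ cs i + 1)) with
          | none => simp
          | some k => simp; ring
        · rw [if_pos (by right; right; rw [hbang]; simpa using ht)]
          simp [ht]
  · rw [dif_neg hi]
    rw [List.drop_eq_nil_of_le (by omega)]
    simp [pvP0]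
termination_by cs.length - i
decreasing_by have := pvAJ_ge cs i; omega

-- B's automaton agrees with the reference parser (state false ↔ pvP0, state true ↔ pvP1)
theorem pvBLoop_spec (cs : List Char) (cnt : Int) :
    (pvBLoop cs cnt false =
      match pvP0 cs with
      | some k => cnt + (k : Int)
      | none => 0) ∧
    (pvBLoop cs cnt true =
      match pvP1 cs with
      | some k => cnt + (k : Int)
      | none => 0) := by
  induction cs generalizing cnt with
  | nil => constructor <;> simp [pvBLoop, pvP0, pvP1]
  | cons c rest ih =>
    constructor
    · by_cases hl : pvIsLet c
      · rw [show pvBLoop (c :: rest) cnt false = pvBLoop rest cnt true by simp [pvBLoop, hl]]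
        rw [(ih cnt).2, pvP0, if_pos hl]
      · simp [pvBLoop, hl, pvP0]
    · by_cases hl : pvIsLet c
      · rw [show pvBLoop (c :: rest) cnt true = pvBLoop rest cnt true by simp [pvBLoop, hl]]
        rw [(ih cnt).2, pvP1, if_pos hl]
      · by_cases ht : pvIsTone c
        · rw [show pvBLoop (c :: rest) cnt true = pvBLoop rest (cnt + 1) false by
            simp [pvBLoop, hl, ht]]
          rw [(ih (cnt + 1)).1, pvP1]
          simp only [hl, Bool.false_eq_true, if_false, if_pos ht]
          cases hp : pvP0 rest with
          | none => simp
          | some k => simp; ring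
        · rw [show pvBLoop (c :: rest) cnt true = 0 by simp [pvBLoop, hl, ht]]
          rw [pvP1]
          simp [hl, ht]

-- ===== VERDICT (by name: the statement is the Claim_ definition above) =====
theorem count_syllables_concat_py_spec : Claim_equal_count_syllables_concat_py := by
  intro token _
  unfold Spec_count_syllables_concat_py count_syllables_concat_py count_syllables_concat_py_alt
  by_cases h : token.toList = []
  · simp [h]
  · rw [if_neg h, if_neg h]
    rw [pvALoop_spec token.toList 0 0, (pvBLoop_spec token.toList 0).1]
    simp
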